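-- pv_equiv track=rewrite | github.com/qingyu9243/LeetCode-CookBook | By Company/karat.py | isValidMatrix
-- ===== SOURCE A (Python) =====
-- def isValidMatrix(matrix):
--     n = len(matrix)
--     # check row
--     for row in matrix:
--         if len(row) != n or set(row) != set(range(1, n+1)):
--             return False
--     # check col
--     for col in range(n):
--         column = [matrix[row][col] for row in range(n)]
--         if set(column) != set(range(1, n+1)):
--             return False
--     return True
-- ===== SOURCE B (Python) =====
-- def isValidMatrix(matrix):
--     n = len(matrix)
--     cols = [0] * n
--     for row in matrix:
--         if len(row) != n:
--             return False
--         rm = 0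
--         for j, v in enumerate(row):
--             if v < 1 or v > n:
--                 return False
--             bit = 1 << v
--             if rm & bit or cols[j] & bit:
--                 return False
--             rm |= bit
--             cols[j] |= bit
--     return True
-- ===== Notes on version B (the rewrite author's own statement) =====
-- stated objective: alternative
-- what changed: B replaces A's per-row/per-column set comparisons against set(range(1,n+1)) by a single sudoku-style pass over the cells that maintains per-row and per-column bitmasks, rejecting a cell immediately on an out-of-range value or a duplicate bit and never building or comparing any set.
import Mathlib
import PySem

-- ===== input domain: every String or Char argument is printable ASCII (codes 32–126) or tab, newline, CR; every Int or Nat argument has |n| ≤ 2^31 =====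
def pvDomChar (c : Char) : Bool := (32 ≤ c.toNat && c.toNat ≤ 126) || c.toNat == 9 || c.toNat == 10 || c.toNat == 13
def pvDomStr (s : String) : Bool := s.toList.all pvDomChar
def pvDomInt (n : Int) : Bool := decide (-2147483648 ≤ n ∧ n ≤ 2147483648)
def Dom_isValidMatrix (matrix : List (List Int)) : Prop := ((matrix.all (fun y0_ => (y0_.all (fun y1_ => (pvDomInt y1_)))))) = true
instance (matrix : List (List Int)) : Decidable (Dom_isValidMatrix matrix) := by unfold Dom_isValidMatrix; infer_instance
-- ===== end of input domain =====

-- B checks validity in one pass over the cells with per-row/per-column bitmasks (range check +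
-- duplicate-bit detection, early exit) instead of A's two staged passes that compare each row set
-- and each reconstructed column set against set(range(1, n+1)) (objective: alternative, same O(n^2)).


-- ===== PORT A =====
-- first loop: 'for row in matrix: if len(row) != n or set(row) != set(range(1, n+1)): return False'
def pvRowsOkA (n : Nat) : List (List Int) → Bool
  | [] => true
  | row :: rest =>
    if row.length != n
        || !(PySem.Set.equal (PySem.Set.ofList row)
              (PySem.Set.ofList (PySem.List.pyRange 1 ((n : Int) + 1) 1))) then
      false
    else pvRowsOkA n rest

-- second loop: 'for col in range(n): column = [matrix[row][col] for row in range(n)]; …'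
-- matrix[row][col] is ported as pyGetD: when this loop runs every row has length n = len(matrix),
-- so both indices are in range and the defaults are never used (Python raises nowhere here).
def pvColsOkA (matrix : List (List Int)) (n : Nat) : List Int → Bool
  | [] => true
  | col :: rest =>
    let column := (PySem.List.pyRange 0 (n : Int) 1).map
      (fun r => PySem.List.pyGetD (PySem.List.pyGetD matrix r []) col 0)
    if !(PySem.Set.equal (PySem.Set.ofList column)
          (PySem.Set.ofList (PySem.List.pyRange 1 ((n : Int) + 1) 1))) then
      false
    else pvColsOkA matrix n rest

def isValidMatrix (matrix : List (List Int)) : Bool :=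
  let n := matrix.length
  if pvRowsOkA n matrix then pvColsOkA matrix n (PySem.List.pyRange 0 (n : Int) 1)
  else false

-- ===== PORT B =====
-- inner loop 'for j, v in enumerate(row): …' walking the row together with the column masks;
-- rm is the current row's mask (Python's local `rm`), the returned list is the updated `cols`.
-- Masks are Nat: Python's `1 << v`, `&`, `|` on the always-nonnegative masks are `1 <<< v.toNat`,
-- `&&&`, `|||` (exact: v ≥ 1 is checked before the shift, so toNat loses nothing).
def pvProcRow (n : Nat) : List Int → List Nat → Nat → Option (List Nat)
  | [], cs, _ => some cs
  | v :: vs, c :: cs, rm =>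
    if v < 1 ∨ v > (n : Int) then none
    else
      let bit := 1 <<< v.toNat
      if rm &&& bit ≠ 0 ∨ c &&& bit ≠ 0 then none
      else
        match pvProcRow n vs cs (rm ||| bit) with
        | none => none
        | some cs' => some ((c ||| bit) :: cs')
  | _ :: _, [], _ => none

-- outer loop 'for row in matrix: …' (none = an early `return False` inside the row)
def pvProcRows (n : Nat) : List (List Int) → List Nat → Bool
  | [], _ => true
  | row :: rest, cols =>
    if row.length ≠ n then false
    else
      match pvProcRow n row cols 0 with
      | none => false
      | some cols' => pvProcRows n rest cols'

def isValidMatrix_alt (matrix : List (List Int)) : Bool :=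
  pvProcRows matrix.length matrix (List.replicate matrix.length 0)

-- ===== PRECONDITION & SPEC =====
def Spec_isValidMatrix (matrix : List (List Int)) (out : Bool) : Prop := out = isValidMatrix_alt matrix
instance (matrix : List (List Int)) (out : Bool) : Decidable (Spec_isValidMatrix matrix out) := by unfold Spec_isValidMatrix; infer_instance

-- ===== CLAIM (what is proved, stated in full; the proofs are below) =====
def Claim_equal_isValidMatrix : Prop := ∀ (matrix : List (List Int)), Dom_isValidMatrix matrix → Spec_isValidMatrix matrix (isValidMatrix matrix)

-- ===== LEMMAS AND PROOFS =====

-- helper predicates used only by the proofs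
abbrev pvRange (n : Nat) (l : List Int) : Prop := ∀ v ∈ l, 1 ≤ v ∧ v ≤ (n : Int)
def pvCol (m : List (List Int)) (j : Nat) : List Int := m.map (fun r => r.getD j 0)
def pvSEq (n : Nat) (l : List Int) : Prop :=
  PySem.Set.equal (PySem.Set.ofList l)
    (PySem.Set.ofList (PySem.List.pyRange 1 ((n : Int) + 1) 1)) = true
abbrev pvRowCond (n : Nat) (vs : List Int) (cs : List Nat) (rm : Nat) : Prop :=
  pvRange n vs ∧ vs.Nodup ∧ (∀ v ∈ vs, rm &&& (1 <<< v.toNat) = 0) ∧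
    (∀ p ∈ vs.zip cs, p.2 &&& (1 <<< p.1.toNat) = 0)
def pvRowsGood (n : Nat) (m : List (List Int)) : Prop :=
  ∀ row ∈ m, row.length = n ∧ pvRange n row ∧ row.Nodup
def pvColsCond (rest : List (List Int)) (cols : List Nat) : Prop :=
  ∀ j, (hj : j < cols.length) → (pvCol rest j).Nodup ∧
    ∀ w ∈ pvCol rest j, cols[j] &&& (1 <<< w.toNat) = 0

-- bit facts
theorem pv_or_shift_and_shift (a p q : Nat) :
    (a ||| (1 <<< p)) &&& (1 <<< q) = 0 ↔ (a &&& (1 <<< q) = 0 ∧ p ≠ q) := by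
  rw [Nat.one_shiftLeft, Nat.one_shiftLeft, Nat.and_two_pow, Nat.and_two_pow,
    Nat.testBit_or, Nat.testBit_two_pow]
  cases h : a.testBit q <;> by_cases hpq : p = q <;> simp [hpq, Nat.pow_pos]

-- characterization of the inner loop
theorem pvProcRow_char (n : Nat) : ∀ (vs : List Int) (cs : List Nat) (rm : Nat),
    vs.length = cs.length →
    pvProcRow n vs cs rm =
      if pvRowCond n vs cs rm
      then some (List.zipWith (fun v c => c ||| (1 <<< v.toNat)) vs cs)
      else none := by
  intro vs
  induction vs with
  | nil =>
    intro cs rm h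
    cases cs with
    | nil =>
      rw [if_pos ⟨by simp [pvRange], by simp, by simp, by simp⟩]; rfl
    | cons c cs => simp at h
  | cons v vs ih =>
    intro cs rm h
    cases cs with
    | nil => simp at h
    | cons c cs =>
      simp only [pvProcRow]
      by_cases h1 : v < 1 ∨ v > (n : Int)
      · rw [if_pos h1, if_neg]
        rintro ⟨hr, -, -, -⟩
        have := hr v (List.mem_cons_self ..)
        omega
      · rw [if_neg h1]
        push Not at h1
        by_cases h2 : rm &&& (1 <<< v.toNat) ≠ 0 ∨ c &&& (1 <<< v.toNat) ≠ 0
        · rw [if_pos h2, if_neg]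
          rintro ⟨-, -, hrm, hz⟩
          rcases h2 with h2 | h2
          · exact h2 (hrm v (List.mem_cons_self ..))
          · exact h2 (hz (v, c) (by rw [List.zip_cons_cons]; exact List.mem_cons_self ..))
        · rw [if_neg h2]
          push Not at h2
          rw [ih cs (rm ||| (1 <<< v.toNat)) (by simpa using h)]
          by_cases hc : pvRowCond n vs cs (rm ||| (1 <<< v.toNat))
          · rw [if_pos hc, if_pos]
            · rfl
            · obtain ⟨hr, hnd, hrm', hz⟩ := hc
              refine ⟨?_, ?_, ?_, ?_⟩
              · intro w hw
                rcases List.mem_cons.mp hw with rfl | hw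
                · omega
                · exact hr w hw
              · rw [List.nodup_cons]
                refine ⟨fun hv => ?_, hnd⟩
                have := (pv_or_shift_and_shift ..).mp (hrm' v hv)
                exact this.2 rfl
              · intro w hw
                rcases List.mem_cons.mp hw with rfl | hw
                · exact h2.1
                · exact ((pv_or_shift_and_shift ..).mp (hrm' w hw)).1
              · intro p hp
                rw [List.zip_cons_cons, List.mem_cons] at hp
                rcases hp with rfl | hp
                · exact h2.2
                · exact hz p hp
          · rw [if_neg hc, if_neg]
            rintro ⟨hr, hnd, hrm, hz⟩
            apply hc
            refine ⟨fun w hw => hr w (List.mem_cons_of_mem _ hw),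
              (List.nodup_cons.mp hnd).2, ?_,
              fun p hp => hz p (by rw [List.zip_cons_cons]; exact List.mem_cons_of_mem _ hp)⟩
            intro w hw
            rw [pv_or_shift_and_shift]
            refine ⟨hrm w (List.mem_cons_of_mem _ hw), ?_⟩
            have hvw : v ≠ w := fun e => (List.nodup_cons.mp hnd).1 (e ▸ hw)
            have h3 := hr w (List.mem_cons_of_mem _ hw)
            omega

theorem pvCol_range (n : Nat) (rest : List (List Int)) (j : Nat) (hj : j < n)
    (hrows : pvRowsGood n rest) : pvRange n (pvCol rest j) := by
  intro w hw
  simp only [pvCol, List.mem_map] at hw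
  obtain ⟨r, hr, rfl⟩ := hw
  obtain ⟨hl, hrange, -⟩ := hrows r hr
  exact hrange _ (by rw [List.getD_eq_getElem _ _ (by omega)]; exact List.getElem_mem _)

theorem pvColsCond_cons (n : Nat) (row : List Int) (rest : List (List Int)) (cols : List Nat)
    (hlen : cols.length = n) (hrl : row.length = n)
    (hrr : pvRange n row) (hrows : pvRowsGood n rest)
    (hrz : ∀ p ∈ row.zip cols, p.2 &&& (1 <<< p.1.toNat) = 0) :
    (pvColsCond rest (List.zipWith (fun v c => c ||| (1 <<< v.toNat)) row cols) ↔
      pvColsCond (row :: rest) cols) := by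
  unfold pvColsCond
  have hlz : (List.zipWith (fun v c => c ||| (1 <<< v.toNat)) row cols).length = n := by
    simp [List.length_zipWith]; omega
  constructor
  · intro h j hj
    have hj' : j < n := by omega
    obtain ⟨hnd, hfr⟩ := h j (by omega)
    rw [List.getElem_zipWith] at hfr
    have hcons : pvCol (row :: rest) j = row[j] :: pvCol rest j := by
      simp only [pvCol, List.map_cons]
      rw [List.getD_eq_getElem row 0 (show j < row.length by omega)]
    rw [hcons]
    have hhead : cols[j] &&& (1 <<< (row[j]).toNat) = 0 := by
      have : (row[j], cols[j]) ∈ row.zip cols := by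
        have hjz : j < (row.zip cols).length := by simp [List.length_zip]; omega
        have := List.getElem_mem hjz
        rwa [List.getElem_zip] at this
      exact hrz _ this
    refine ⟨List.nodup_cons.mpr ⟨fun hm => ?_, hnd⟩, ?_⟩
    · have := ((pv_or_shift_and_shift ..).mp (hfr _ hm)).2
      exact this rfl
    · intro w hw
      rcases List.mem_cons.mp hw with rfl | hw
      · exact hhead
      · exact ((pv_or_shift_and_shift ..).mp (hfr w hw)).1
  · intro h j hj
    have hj' : j < n := by omega
    obtain ⟨hnd, hfr⟩ := h j (by omega)
    have hcons : pvCol (row :: rest) j = row[j] :: pvCol rest j := by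
      simp only [pvCol, List.map_cons]
      rw [List.getD_eq_getElem row 0 (show j < row.length by omega)]
    rw [hcons] at hnd hfr
    rw [List.getElem_zipWith]
    obtain ⟨hnotm, hnd'⟩ := List.nodup_cons.mp hnd
    refine ⟨hnd', fun w hw => ?_⟩
    rw [pv_or_shift_and_shift]
    refine ⟨hfr w (List.mem_cons_of_mem _ hw), fun he => hnotm ?_⟩
    have h1 := hrr _ (List.getElem_mem (show j < row.length by omega))
    have h2 := pvCol_range n rest j hj' hrows w hw
    have : row[j] = w := by omega
    rwa [this]


-- characterization of the outer loop
theorem pvProcRows_char (n : Nat) : ∀ (rest : List (List Int)) (cols : List Nat),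
    cols.length = n →
    (pvProcRows n rest cols = true ↔ pvRowsGood n rest ∧ pvColsCond rest cols) := by
  intro rest
  induction rest with
  | nil =>
    intro cols h
    simp [pvProcRows, pvRowsGood, pvColsCond, pvCol]
  | cons row rest ih =>
    intro cols hlen
    simp only [pvProcRows]
    by_cases hl : row.length = n
    · rw [if_neg (fun hx => hx hl)]
      rw [pvProcRow_char n row cols 0 (by omega)]
      by_cases hcond : pvRowCond n row cols 0
      · rw [if_pos hcond]
        show pvProcRows n rest _ = true ↔ _
        rw [ih _ (by simp [List.length_zipWith]; omega)]
        obtain ⟨hrr, hrnd, -, hrz⟩ := hcond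
        by_cases hrows : pvRowsGood n rest
        · rw [pvColsCond_cons n row rest cols hlen hl hrr hrows hrz]
          constructor
          · rintro ⟨-, hc⟩
            refine ⟨?_, hc⟩
            intro r hr
            rcases List.mem_cons.mp hr with rfl | hr
            · exact ⟨hl, hrr, hrnd⟩
            · exact hrows r hr
          · rintro ⟨-, hc⟩
            exact ⟨hrows, hc⟩
        · constructor
          · rintro ⟨hg, -⟩; exact absurd hg hrows
          · rintro ⟨hg, -⟩
            exact absurd (fun r hr => hg r (List.mem_cons_of_mem _ hr)) hrows
      · rw [if_neg hcond]
        show false = true ↔ _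
        simp only [Bool.false_eq_true, false_iff]
        rintro ⟨hg, hc⟩
        apply hcond
        obtain ⟨-, hrr, hrnd⟩ := hg row (List.mem_cons_self ..)
        refine ⟨hrr, hrnd, by simp [Nat.zero_and], ?_⟩
        rw [List.forall_mem_iff_forall_getElem]
        intro i hi
        rw [List.getElem_zip]
        have hiz : i < n := by rw [List.length_zip] at hi; omega
        have hcons : pvCol (row :: rest) i = row[i]'(by omega) :: pvCol rest i := by
          simp only [pvCol, List.map_cons]
          rw [List.getD_eq_getElem row 0 (show i < row.length by omega)]
        obtain ⟨-, hfr⟩ := hc i (by omega)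
        exact hfr _ (by rw [hcons]; exact List.mem_cons_self ..)
    · rw [if_pos hl]
      simp only [Bool.false_eq_true, false_iff]
      rintro ⟨hg, -⟩
      exact hl (hg row (List.mem_cons_self ..)).1

-- pigeonhole bridge: for a length-n list, set equality with {1..n} = in-range + no duplicates
theorem pvSEq_iff (n : Nat) (l : List Int) (hlen : l.length = n) :
    pvSEq n l ↔ pvRange n l ∧ l.Nodup := by
  unfold pvSEq
  rw [PySem.Set.equal_iff]
  simp only [PySem.Set.mem_ofList, PySem.List.mem_pyRange_one]
  constructor
  · intro h
    have hmem : ∀ x : Int, x ∈ l ↔ 1 ≤ x ∧ x ≤ (n : Int) := by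
      intro x; rw [h x]; omega
    refine ⟨fun v hv => (hmem v).mp hv, ?_⟩
    -- pigeonhole: l.toFinset = Icc 1 n has card n = l.length, so dedup = l
    have hsub : l.toFinset = Finset.Icc (1 : Int) (n : Int) := by
      ext x
      rw [List.mem_toFinset, Finset.mem_Icc]
      exact hmem x
    have hcard : l.toFinset.card = n := by
      rw [hsub, Int.card_Icc]
      omega
    have hdlen : l.dedup.length = l.length := by
      rw [← List.card_toFinset, hcard, hlen]
    have := (List.Sublist.length_eq (List.dedup_sublist l)).mp hdlen
    exact List.dedup_eq_self.mp this
  · rintro ⟨hr, hnd⟩ x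
    constructor
    · intro hx
      have := hr x hx
      omega
    · intro hx
      have hsub : l.toFinset ⊆ Finset.Icc (1 : Int) (n : Int) := by
        intro y hy
        rw [List.mem_toFinset] at hy
        rw [Finset.mem_Icc]
        exact hr y hy
      have hcard : l.toFinset.card = (Finset.Icc (1 : Int) (n : Int)).card := by
        rw [List.toFinset_card_of_nodup hnd, hlen, Int.card_Icc]
        omega
      have heq : l.toFinset = Finset.Icc (1 : Int) (n : Int) :=
        Finset.eq_of_subset_of_card_le hsub (le_of_eq hcard.symm)
      have : x ∈ l.toFinset := by
        rw [heq, Finset.mem_Icc]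
        omega
      rwa [List.mem_toFinset] at this

-- A-side characterizations (loop shapes of port A)
theorem pvRowsOkA_eq_all (n : Nat) (m : List (List Int)) :
    pvRowsOkA n m = m.all (fun row => (row.length == n) &&
      PySem.Set.equal (PySem.Set.ofList row)
        (PySem.Set.ofList (PySem.List.pyRange 1 ((n : Int) + 1) 1))) := by
  induction m with
  | nil => rfl
  | cons row rest ih =>
    simp only [pvRowsOkA, List.all_cons, ← ih]
    cases h1 : (row.length == n)
    · simp [bne, h1]
    · cases h2 : PySem.Set.equal (PySem.Set.ofList row)
        (PySem.Set.ofList (PySem.List.pyRange 1 ((n : Int) + 1) 1))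
      · simp [bne, h1]
      · simp [bne, h1]

theorem pvColsOkA_eq_all (matrix : List (List Int)) (n : Nat) (cs : List Int) :
    pvColsOkA matrix n cs = cs.all (fun col =>
      PySem.Set.equal
        (PySem.Set.ofList ((PySem.List.pyRange 0 (n : Int) 1).map
          (fun r => PySem.List.pyGetD (PySem.List.pyGetD matrix r []) col 0)))
        (PySem.Set.ofList (PySem.List.pyRange 1 ((n : Int) + 1) 1))) := by
  induction cs with
  | nil => rfl
  | cons col rest ih =>
    simp only [pvColsOkA, List.all_cons, ← ih]
    cases h : PySem.Set.equal
        (PySem.Set.ofList ((PySem.List.pyRange 0 (n : Int) 1).map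
          (fun r => PySem.List.pyGetD (PySem.List.pyGetD matrix r []) col 0)))
        (PySem.Set.ofList (PySem.List.pyRange 1 ((n : Int) + 1) 1))
    · simp
    · simp

theorem pvColumn_eq (m : List (List Int)) (j : Nat) (hj : j < m.length) :
    ((List.map (fun k => ((k : Nat) : Int)) (List.range m.length)).map
        (fun r => PySem.List.pyGetD (PySem.List.pyGetD m r []) ((j : Nat) : Int) 0))
      = pvCol m j := by
  rw [List.map_map]
  apply List.ext_getElem
  · simp [pvCol]
  · intro k hk1 hk2
    simp only [List.getElem_map, List.getElem_range, Function.comp_apply,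
      PySem.List.pyGetD_natCast, pvCol]
    rw [List.getD_eq_getElem m [] (by simpa [pvCol] using hk2)]

theorem isValidMatrix_char (m : List (List Int)) :
    isValidMatrix m = true ↔
      (∀ row ∈ m, row.length = m.length ∧ pvSEq m.length row) ∧
      (∀ j, j < m.length → pvSEq m.length (pvCol m j)) := by
  simp only [isValidMatrix]
  by_cases hbad : ∃ row ∈ m, row.length ≠ m.length
  · obtain ⟨row, hmem, hne⟩ := hbad
    have hA : pvRowsOkA m.length m = false := by
      rw [pvRowsOkA_eq_all]
      simp only [List.all_eq_false]
      exact ⟨row, hmem, by simp [Bool.and_eq_true, beq_iff_eq, hne]⟩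
    rw [hA]
    simp only [Bool.false_eq_true, if_false, false_iff]
    rintro ⟨h1, -⟩
    exact hne (h1 row hmem).1
  · have hall : ∀ row ∈ m, row.length = m.length := by
      intro r hr
      by_contra hne
      exact hbad ⟨r, hr, hne⟩
    have hrows : pvRowsOkA m.length m = true ↔ ∀ row ∈ m, pvSEq m.length row := by
      rw [pvRowsOkA_eq_all]
      simp only [List.all_eq_true, Bool.and_eq_true, beq_iff_eq]
      unfold pvSEq
      constructor
      · intro h r hr; exact (h r hr).2
      · intro h r hr; exact ⟨hall r hr, h r hr⟩
    have hcols : pvColsOkA m m.length (PySem.List.pyRange 0 (m.length : Int) 1) = true ↔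
        ∀ j, j < m.length → pvSEq m.length (pvCol m j) := by
      rw [pvColsOkA_eq_all, PySem.List.pyRange_zero_nat, List.all_map, List.all_eq_true]
      unfold pvSEq
      constructor
      · intro h j hj
        have := h j (List.mem_range.mpr hj)
        rwa [Function.comp_apply, pvColumn_eq m j hj] at this
      · intro h j hj
        have hj' := List.mem_range.mp hj
        rw [Function.comp_apply, pvColumn_eq m j hj']
        exact h j hj'
    by_cases hA : pvRowsOkA m.length m = true
    · rw [hA, if_pos rfl, hcols]
      have hR : ∀ row ∈ m, row.length = m.length ∧ pvSEq m.length row :=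
        fun r hr => ⟨hall r hr, (hrows.mp hA) r hr⟩
      constructor
      · intro h; exact ⟨hR, h⟩
      · rintro ⟨-, h⟩; exact h
    · rw [Bool.not_eq_true] at hA
      rw [hA]
      simp only [Bool.false_eq_true, if_false, false_iff]
      rintro ⟨h1, -⟩
      exact absurd (hrows.mpr (fun r hr => (h1 r hr).2)) (by simp [hA])

theorem isValidMatrix_alt_char (m : List (List Int)) :
    isValidMatrix_alt m = true ↔
      pvRowsGood m.length m ∧ ∀ j, j < m.length → (pvCol m j).Nodup := by
  unfold isValidMatrix_alt
  rw [pvProcRows_char m.length m (List.replicate m.length 0) (by simp)]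
  constructor
  · rintro ⟨hg, hc⟩
    refine ⟨hg, fun j hj => (hc j (by simpa using hj)).1⟩
  · rintro ⟨hg, hc⟩
    refine ⟨hg, fun j hj => ⟨hc j (by simpa using hj), fun w hw => ?_⟩⟩
    rw [List.getElem_replicate]
    simp [Nat.zero_and]

-- ===== VERDICT (by name: the statement is the Claim_ definition above) =====
theorem isValidMatrix_spec : Claim_equal_isValidMatrix := by
  intro matrix _
  unfold Spec_isValidMatrix
  rw [Bool.eq_iff_iff, isValidMatrix_char, isValidMatrix_alt_char]
  by_cases hall : ∀ row ∈ matrix, row.length = matrix.length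
  · by_cases hrg : ∀ row ∈ matrix, pvRange matrix.length row ∧ row.Nodup
    · have hrows : pvRowsGood matrix.length matrix :=
        fun r hr => ⟨hall r hr, (hrg r hr).1, (hrg r hr).2⟩
      have hrowiff : ∀ row ∈ matrix, row.length = matrix.length ∧ pvSEq matrix.length row := by
        intro r hr
        exact ⟨hall r hr, (pvSEq_iff matrix.length r (hall r hr)).mpr (hrg r hr)⟩
      have hcoliff : ∀ j, j < matrix.length →
          (pvSEq matrix.length (pvCol matrix j) ↔ (pvCol matrix j).Nodup) := by
        intro j hj
        rw [pvSEq_iff matrix.length (pvCol matrix j) (by simp [pvCol])]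
        have := pvCol_range matrix.length matrix j hj hrows
        constructor
        · rintro ⟨-, h⟩; exact h
        · intro h; exact ⟨this, h⟩
      constructor
      · rintro ⟨-, hc⟩
        exact ⟨hrows, fun j hj => (hcoliff j hj).mp (hc j hj)⟩
      · rintro ⟨-, hc⟩
        exact ⟨hrowiff, fun j hj => (hcoliff j hj).mpr (hc j hj)⟩
    · constructor
      · rintro ⟨h1, -⟩
        exact absurd (fun r hr => by
          have h := (pvSEq_iff matrix.length r (hall r hr)).mp (h1 r hr).2
          exact ⟨h.1, h.2⟩) hrg
      · rintro ⟨h1, -⟩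
        exact absurd (fun r hr => ⟨(h1 r hr).2.1, (h1 r hr).2.2⟩) hrg
  · constructor
    · rintro ⟨h1, -⟩
      exact absurd (fun r hr => (h1 r hr).1) hall
    · rintro ⟨h1, -⟩
      exact absurd (fun r hr => (h1 r hr).1) hall
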